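-- pv_equiv track=rewrite | github.com/pypi-data/pypi-mirror-361 | packages/pyaecal/pyaecal-0.9.0.tar.gz/pyaecal-0.9.0/src/pyaecal/dcm.py | WERT
-- ===== SOURCE A (Python) =====
-- def WERT(data):
--     res = ""
--     # TODO max text length !
--     for block in [data[i : i + 6] for i in range(0, len(data), 6)]:
--         res = "%s\tWERT" % res
--         for i in block:
--             res = "%s\t%s" % (res, i)
--         res = "%s\n" % res
--     return res
-- ===== SOURCE B (Python) =====
-- def WERT(data):
--     parts = []
--     for i, element in enumerate(data):
--         if i % 6 == 0:
--             parts.append("\tWERT")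
--         parts.append("\t%s" % element)
--         if i % 6 == 5:
--             parts.append("\n")
--     if len(data) % 6 != 0:
--         parts.append("\n")
--     return "".join(parts)
-- ===== Notes on version B (the rewrite author's own statement) =====
-- stated objective: faster
-- what changed: Replaces the pre-built list of 6-chunks with nested loops and quadratic '%s...' % res string re-concatenation by a single enumerate pass driven by i % 6 that appends fragments to a list joined once at the end.
import Mathlib
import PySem

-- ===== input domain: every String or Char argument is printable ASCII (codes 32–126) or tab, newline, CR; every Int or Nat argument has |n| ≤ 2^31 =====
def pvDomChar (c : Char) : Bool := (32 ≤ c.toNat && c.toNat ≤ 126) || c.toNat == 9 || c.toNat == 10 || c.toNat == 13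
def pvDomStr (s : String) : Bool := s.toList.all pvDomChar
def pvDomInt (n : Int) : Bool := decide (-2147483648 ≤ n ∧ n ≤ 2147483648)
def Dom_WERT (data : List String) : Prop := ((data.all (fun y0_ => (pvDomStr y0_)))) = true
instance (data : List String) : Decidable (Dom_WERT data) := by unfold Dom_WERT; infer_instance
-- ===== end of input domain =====

-- B replaces A's chunked nested loops with quadratic string re-concatenation by one
-- enumerate pass over the data collecting fragments joined once at the end (faster: linear vs quadratic).


-- ===== PORT A =====
-- strings are built on the List Char side (PySem convention); result wrapped with String.ofList
def WERT (data : List String) : String :=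
  String.ofList ((PySem.List.pyRange 0 (data.length : Int) 6).foldl (fun res i =>
    let block := PySem.List.slice data (some i) (some (i + 6))
    let res := res ++ "\tWERT".toList
    let res := block.foldl (fun r s => r ++ '\t' :: s.toList) res
    res ++ ['\n']) [])

-- ===== PORT B =====
-- Source B: one pass over enumerate(data) collecting fragments in `parts`, joined once at the end
def WERT_alt (data : List String) : String :=
  let parts : List (List Char) := (PySem.List.enumerate data 0).foldl (fun ps p =>
    let ps := if PySem.Int.mod p.1 6 == 0 then ps ++ ["\tWERT".toList] else ps
    let ps := ps ++ [('\t' :: p.2.toList)]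
    if PySem.Int.mod p.1 6 == 5 then ps ++ [['\n']] else ps) []
  let parts := if PySem.Int.mod (data.length : Int) 6 != 0 then parts ++ [['\n']] else parts
  String.ofList parts.flatten

-- ===== PRECONDITION & SPEC =====
def Spec_WERT (data : List String) (out : String) : Prop := out = WERT_alt data
instance (data : List String) (out : String) : Decidable (Spec_WERT data out) := by unfold Spec_WERT; infer_instance

-- ===== CLAIM (what is proved, stated in full; the proofs are below) =====
def Claim_equal_WERT : Prop := ∀ (data : List String), Dom_WERT data → Spec_WERT data (WERT data)

-- ===== LEMMAS AND PROOFS =====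

-- one data row "\t<s>" as chars
def pvRow (s : String) : List Char := '\t' :: s.toList

-- B's fragment for one enumerated element (what one iteration of Source B's loop appends)
def pvFrag (p : Int × String) : List Char :=
  (if PySem.Int.mod p.1 6 == 0 then "\tWERT".toList else []) ++
  pvRow p.2 ++
  (if PySem.Int.mod p.1 6 == 5 then ['\n'] else [])

-- B's parts-list fragment for one enumerated element
def pvPieces (p : Int × String) : List (List Char) :=
  (if PySem.Int.mod p.1 6 == 0 then ["\tWERT".toList] else []) ++
  [pvRow p.2] ++
  (if PySem.Int.mod p.1 6 == 5 then [['\n']] else [])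

-- common normal form: one "\tWERT" 6-chunk line at a time
def pvAflat : List String → List Char
  | [] => []
  | a :: b :: c :: d :: e :: f :: rest =>
      "\tWERT".toList ++ ([a, b, c, d, e, f]).flatMap pvRow ++ '\n' :: pvAflat rest
  | l => "\tWERT".toList ++ l.flatMap pvRow ++ ['\n']

-- B's char stream, flattened
def pvBflat (data : List String) : List Char :=
  (PySem.List.enumerate data 0).flatMap pvFrag ++
    (if PySem.Int.mod (data.length : Int) 6 != 0 then ['\n'] else [])

lemma pvAflat_ne_nil (data : List String) (h : data ≠ []) :
    pvAflat data = "\tWERT".toList ++ (List.take 6 data).flatMap pvRow ++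
      '\n' :: pvAflat (List.drop 6 data) := by
  rcases data with _ | ⟨a, _ | ⟨b, _ | ⟨c, _ | ⟨d, _ | ⟨e, _ | ⟨f, rest⟩⟩⟩⟩⟩⟩
  · exact absurd rfl h
  all_goals simp [pvAflat]

-- ---------- A = pvAflat ----------

lemma pvA_range (m : Nat) : ∀ (data : List String), m = (data.length + 5) / 6 →
    (List.range m).flatMap
        (fun k => "\tWERT".toList ++ (List.take 6 (List.drop (6 * k) data)).flatMap pvRow ++ ['\n'])
      = pvAflat data := by
  induction m with
  | zero =>
    intro data hm
    have : data.length = 0 := by omega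
    have : data = [] := List.length_eq_zero_iff.mp this
    subst this
    simp [pvAflat]
  | succ m ih =>
    intro data hm
    have hlen : 1 ≤ data.length := by omega
    have hne : data ≠ [] := by
      intro h; subst h; simp at hlen
    rw [List.range_succ_eq_map, List.flatMap_cons, List.flatMap_map]
    have hrec : (List.range m).flatMap
        (fun k => "\tWERT".toList ++
          (List.take 6 (List.drop (6 * Nat.succ k) data)).flatMap pvRow ++ ['\n'])
        = pvAflat (List.drop 6 data) := by
      have h1 : ∀ k : Nat, List.drop (6 * Nat.succ k) data = List.drop (6 * k) (List.drop 6 data) := by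
        intro k; rw [List.drop_drop]; congr 1; omega
      simp only [h1]
      exact ih (List.drop 6 data) (by rw [List.length_drop]; omega)
    rw [hrec, pvAflat_ne_nil data hne]
    simp

lemma pvA_eq_flat (data : List String) : WERT data = String.ofList (pvAflat data) := by
  unfold WERT
  rcases hd : data with _ | ⟨x, xs⟩
  · rfl
  · rw [← hd]
    have hlen : 0 < data.length := by rw [hd]; simp
    rw [PySem.List.pyRange_of_pos 0 (data.length : Int) (by norm_num)]
    rw [if_pos (by exact_mod_cast hlen)]
    have hM : (((data.length : Int) - 0 + 6 - 1) / 6).toNat = (data.length + 5) / 6 := by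
      omega
    rw [hM, List.foldl_map]
    have hstep : (fun (res : List Char) (k : Nat) =>
        ((PySem.List.slice data (some ((0 : Int) + 6 * (k : Int)))
            (some ((0 : Int) + 6 * (k : Int) + 6))).foldl
          (fun r s => r ++ '\t' :: s.toList) (res ++ "\tWERT".toList)) ++ ['\n'])
        = fun res k => res ++
          ("\tWERT".toList ++ (List.take 6 (List.drop (6 * k) data)).flatMap pvRow ++ ['\n']) := by
      funext res k
      rw [PySem.List.slice_toNat data (by positivity) (by positivity)]
      rw [PySem.List.foldl_append_eq_flatMap (fun s : String => '\t' :: s.toList)]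
      have h2 : ((0 : Int) + 6 * (k : Int) + 6).toNat - ((0 : Int) + 6 * (k : Int)).toNat = 6 := by
        omega
      have h1 : ((0 : Int) + 6 * (k : Int)).toNat = 6 * k := by omega
      have hrow : (fun s : String => '\t' :: s.toList) = pvRow := rfl
      rw [h2, h1, hrow]
      simp
    simp only [hstep]
    rw [PySem.List.foldl_append_eq_flatMap, List.nil_append]
    rw [pvA_range ((data.length + 5) / 6) data rfl]

-- ---------- B = pvBflat ----------

lemma pv_flatten_flatMap {α : Type} (f : α → List (List Char)) (l : List α) :
    (l.flatMap f).flatten = l.flatMap (fun x => (f x).flatten) := by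
  induction l with
  | nil => rfl
  | cons x xs ih => simp [List.flatMap_cons, List.flatten_append, ih]

lemma pvB_eq_flat (data : List String) : WERT_alt data = String.ofList (pvBflat data) := by
  unfold WERT_alt pvBflat
  have hstep : (fun (ps : List (List Char)) (p : Int × String) =>
      (if PySem.Int.mod p.1 6 == 5
        then ((if PySem.Int.mod p.1 6 == 0 then ps ++ ["\tWERT".toList] else ps)
              ++ [('\t' :: p.2.toList)]) ++ [['\n']]
        else (if PySem.Int.mod p.1 6 == 0 then ps ++ ["\tWERT".toList] else ps)
              ++ [('\t' :: p.2.toList)]))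
      = fun ps p => ps ++ pvPieces p := by
    funext ps p
    unfold pvPieces pvRow
    split_ifs <;> simp
  simp only []
  rw [show (fun (ps : List (List Char)) p =>
      let ps' := if PySem.Int.mod p.1 6 == 0 then ps ++ ["\tWERT".toList] else ps
      let ps'' := ps' ++ [('\t' :: p.2.toList)]
      if PySem.Int.mod p.1 6 == 5 then ps'' ++ [['\n']] else ps'') =
      fun ps p => ps ++ pvPieces p from hstep]
  rw [PySem.List.foldl_append_eq_flatMap pvPieces, List.nil_append]
  have hfragflat : ∀ p : Int × String, (pvPieces p).flatten = pvFrag p := by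
    intro p; unfold pvPieces pvFrag; split_ifs <;> simp
  split_ifs with h <;>
    simp [List.flatten_append, pv_flatten_flatMap, hfragflat]

-- ---------- pvBflat = pvAflat ----------

lemma pv_mod_add_six (s : Int) : PySem.Int.mod (s + 6) 6 = PySem.Int.mod s 6 := by
  rw [PySem.Int.mod_eq_emod_of_pos (by norm_num), PySem.Int.mod_eq_emod_of_pos (by norm_num)]
  omega

lemma pvB_shift (xs : List String) : ∀ s : Int,
    (PySem.List.enumerate xs (s + 6)).flatMap pvFrag
      = (PySem.List.enumerate xs s).flatMap pvFrag := by
  induction xs with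
  | nil => intro s; rfl
  | cons x xs ih =>
    intro s
    rw [PySem.List.enumerate_cons, PySem.List.enumerate_cons]
    rw [List.flatMap_cons, List.flatMap_cons]
    have h1 : pvFrag (s + 6, x) = pvFrag (s, x) := by
      unfold pvFrag; rw [pv_mod_add_six]
    have h2 : s + 6 + 1 = s + 1 + 6 := by ring
    rw [h1, h2, ih (s + 1)]

lemma pvBA (L : Nat) : ∀ (data : List String), data.length ≤ L → pvBflat data = pvAflat data := by
  induction L with
  | zero =>
    intro data h
    have : data = [] := List.length_eq_zero_iff.mp (by omega)
    subst this
    simp [pvBflat, pvAflat, PySem.List.enumerate, PySem.Int.mod]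
  | succ L ih =>
    intro data hlen
    rcases data with _ | ⟨a, _ | ⟨b, _ | ⟨c, _ | ⟨d, _ | ⟨e, _ | ⟨f, rest⟩⟩⟩⟩⟩⟩
    · simp [pvBflat, pvAflat, PySem.List.enumerate, PySem.Int.mod]
    · simp [pvBflat, pvAflat, pvFrag, PySem.List.enumerate, PySem.Int.mod]
    · simp [pvBflat, pvAflat, pvFrag, PySem.List.enumerate, PySem.Int.mod]
    · simp [pvBflat, pvAflat, pvFrag, PySem.List.enumerate, PySem.Int.mod]
    · simp [pvBflat, pvAflat, pvFrag, PySem.List.enumerate, PySem.Int.mod]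
    · simp [pvBflat, pvAflat, pvFrag, PySem.List.enumerate, PySem.Int.mod]
    · -- at least six elements: peel one full chunk
      have hlen6 : ((a :: b :: c :: d :: e :: f :: rest).length : Int) = (rest.length : Int) + 6 := by
        push_cast [List.length_cons]; ring
      have hrec : pvBflat rest = pvAflat rest :=
        ih rest (by simp only [List.length_cons] at hlen; omega)
      unfold pvBflat at hrec ⊢
      simp only [PySem.List.enumerate_cons, List.flatMap_cons, hlen6, pv_mod_add_six]
      rw [show (0:Int) + 1 + 1 + 1 + 1 + 1 + 1 = 0 + 6 from by norm_num, pvB_shift rest 0]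
      rw [show pvAflat (a :: b :: c :: d :: e :: f :: rest)
          = "\tWERT".toList ++ ([a, b, c, d, e, f]).flatMap pvRow ++ '\n' :: pvAflat rest
          from by simp [pvAflat]]
      rw [← hrec]
      have hfrag0 : ∀ (i : Int) (x : String), (PySem.Int.mod i 6 == 0) = true →
          (PySem.Int.mod i 6 == 5) = false → pvFrag (i, x) = "\tWERT".toList ++ pvRow x := by
        intro i x h1 h2; unfold pvFrag; rw [h1, h2]; simp
      have hfragm : ∀ (i : Int) (x : String), (PySem.Int.mod i 6 == 0) = false →
          (PySem.Int.mod i 6 == 5) = false → pvFrag (i, x) = pvRow x := by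
        intro i x h1 h2; unfold pvFrag; rw [h1, h2]; simp
      have hfrag5 : ∀ (i : Int) (x : String), (PySem.Int.mod i 6 == 0) = false →
          (PySem.Int.mod i 6 == 5) = true → pvFrag (i, x) = pvRow x ++ ['\n'] := by
        intro i x h1 h2; unfold pvFrag; rw [h1, h2]; simp
      rw [hfrag0 0 a (by decide) (by decide),
          hfragm (0+1) b (by decide) (by decide),
          hfragm (0+1+1) c (by decide) (by decide),
          hfragm (0+1+1+1) d (by decide) (by decide),
          hfragm (0+1+1+1+1) e (by decide) (by decide),
          hfrag5 (0+1+1+1+1+1) f (by decide) (by decide)]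
      simp

-- ===== VERDICT (by name: the statement is the Claim_ definition above) =====
theorem WERT_spec : Claim_equal_WERT := by
  intro data _
  unfold Spec_WERT
  rw [pvA_eq_flat, pvB_eq_flat, pvBA data.length data le_rfl]
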